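-- pv_equiv track=rewrite | github.com/goldsergeant/Algorithm-problem-solving | 프로그래머스/3/389481. 봉인된 주문/봉인된 주문.py | solution
-- ===== SOURCE A (Python) =====
-- def get_origin_num_of_word(word):
--     num = 0
--
--     for i in range(len(word)):
--         n = ord(word[i]) - ord('a')
--         num = num * 26 + n+1
--     return num
--
-- def get_word_from_num(num):
--     tmp = []
--     while num > 0:
--         num-=1
--         tmp.append(chr(97+(num%26)))
--         num //= 26
--
--     return ''.join(tmp[::-1])
--
-- def solution(n, bans):
--     for i in range(len(bans)):
--         bans[i] = get_origin_num_of_word(bans[i])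
--
--     bans.sort()
--     for i in range(len(bans)):
--         if bans[i] <= n:
--             n += 1
--
--     return get_word_from_num(n)
-- ===== SOURCE B (Python) =====
-- def _word_num(word):
--     num = 0
--     for ch in word:
--         num = num * 26 + ord(ch) - 96
--     return num
--
-- def _num_word(num):
--     out = ''
--     while num > 0:
--         num -= 1
--         out = chr(97 + num % 26) + out
--         num //= 26
--     return out
--
-- def _bisect_right(a, x):
--     lo, hi = 0, len(a)
--     while lo < hi:
--         mid = (lo + hi) // 2
--         if a[mid] <= x:
--             lo = mid + 1
--         else:
--             hi = mid
--     return lo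
--
-- def solution(n, bans):
--     # same observable mutation as A: bans becomes the sorted list of word numbers
--     bans[:] = sorted(_word_num(w) for w in bans)
--     # search the answer space: the result is the smallest m >= n whose rank among
--     # non-banned values (m minus the number of bans <= m) reaches n
--     m = n
--     while m - _bisect_right(bans, m) < n:
--         m += 1
--     return _num_word(m)
-- ===== Notes on version B (the rewrite author's own statement) =====
-- stated objective: alternative
-- what changed: A shifts n once per sorted ban it scans; B instead searches the answer space, returning the first candidate m >= n whose non-banned rank m - bisect_right(bans, m) reaches n, with a hand-written binary-search rank; the in-place conversion and sort of bans are kept identical.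
import Mathlib
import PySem

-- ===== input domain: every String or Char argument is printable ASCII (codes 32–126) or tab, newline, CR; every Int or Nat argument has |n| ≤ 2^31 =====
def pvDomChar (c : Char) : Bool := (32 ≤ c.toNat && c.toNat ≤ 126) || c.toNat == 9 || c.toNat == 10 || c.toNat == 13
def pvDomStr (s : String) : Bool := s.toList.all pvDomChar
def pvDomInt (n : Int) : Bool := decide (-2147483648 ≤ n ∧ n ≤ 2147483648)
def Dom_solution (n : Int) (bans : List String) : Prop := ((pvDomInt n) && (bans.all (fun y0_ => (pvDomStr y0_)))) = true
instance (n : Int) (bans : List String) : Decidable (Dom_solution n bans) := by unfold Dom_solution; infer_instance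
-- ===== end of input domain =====

-- B replaces A's per-ban shift loop by a search over candidate answers using a hand-written
-- binary-search rank (alternative algorithm, same overall cost). Python A mutates `bans` in
-- place (converts each entry to a number and sorts); B performs the same mutation; the theorems
-- below are about the return value.

-- ===== PORT A =====
-- helper get_origin_num_of_word (shared verbatim by Source A and Source B)
def originNum (word : String) : Int :=
  word.toList.foldl (fun num c => num * 26 + ((c.toNat : Int) - 97 + 1)) 0

-- helper get_word_from_num (shared verbatim by Source A and Source B): the list of appended chars
def wordChars (num : Int) : List Char :=
  if _h : 0 < num then
    Char.ofNat (97 + (PySem.Int.mod (num - 1) 26)).toNat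
      :: wordChars (PySem.Int.floordiv (num - 1) 26)
  else []
termination_by num.toNat
decreasing_by
  rw [PySem.Int.floordiv_eq_ediv_of_pos (by omega : (0:Int) < 26)]; omega

def wordFromNum (num : Int) : String := String.ofList (wordChars num).reverse

def solution (n : Int) (bans : List String) : String :=
  let nums := bans.map (fun w => originNum w)
  let s := PySem.List.sorted nums (fun x => x) false
  let n' := s.foldl (fun m b => if b ≤ m then m + 1 else m) n
  wordFromNum n'

-- ===== PORT B =====
-- Source B's _word_num
def wordNum (word : String) : Int :=
  word.toList.foldl (fun num c => num * 26 + (c.toNat : Int) - 96) 0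

-- Source B's _num_word: the `out` string built by prepending
def numWordAux (num : Int) (out : List Char) : List Char :=
  if _h : 0 < num then
    numWordAux (PySem.Int.floordiv (num - 1) 26)
      (Char.ofNat (97 + (PySem.Int.mod (num - 1) 26)).toNat :: out)
  else out
termination_by num.toNat
decreasing_by
  rw [PySem.Int.floordiv_eq_ediv_of_pos (by omega : (0:Int) < 26)]; omega

def numWord (num : Int) : String := String.ofList (numWordAux num [])

-- hand-written _bisect_right of Source B; the index `mid` is always in range at the call sites,
-- so pyGetD's default is never used
def bisectAux (a : List Int) (x lo hi : Int) : Int :=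
  if _h : lo < hi then
    let mid := PySem.Int.floordiv (lo + hi) 2
    if PySem.List.pyGetD a mid 0 ≤ x then bisectAux a x (mid + 1) hi
    else bisectAux a x lo mid
  else lo
termination_by (hi - lo).toNat
decreasing_by
  all_goals rw [PySem.Int.floordiv_eq_ediv_of_pos (by omega : (0:Int) < 2)]; omega

def bisectRightB (a : List Int) (x : Int) : Int := bisectAux a x 0 (a.length : Int)

-- Source B's `while m - _bisect_right(bans, m) < n: m += 1`; the answer is at most n + len(bans),
-- so fuel len+1 is never exhausted (proved below)
def scanAux (s : List Int) (n : Int) (m : Int) : Nat → Int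
  | 0 => m
  | fuel + 1 => if m - bisectRightB s m < n then scanAux s n (m + 1) fuel else m

def solution_alt (n : Int) (bans : List String) : String :=
  let s := PySem.List.sorted (bans.map (fun w => wordNum w)) (fun x => x) false
  numWord (scanAux s n n (s.length + 1))

-- ===== PRECONDITION & SPEC =====
def Spec_solution (n : Int) (bans : List String) (out : String) : Prop := out = solution_alt n bans
instance (n : Int) (bans : List String) (out : String) : Decidable (Spec_solution n bans out) := by unfold Spec_solution; infer_instance

-- ===== CLAIM (what is proved, stated in full; the proofs are below) =====
def Claim_equal_solution : Prop := ∀ (n : Int) (bans : List String), Dom_solution n bans → Spec_solution n bans (solution n bans)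

-- ===== LEMMAS AND PROOFS =====

-- number of bans ≤ m, as an Int
def cntI (s : List Int) (m : Int) : Int := ((s.filter (fun b => b ≤ m)).length : Int)

lemma cntI_nonneg (s : List Int) (m : Int) : 0 ≤ cntI s m := by
  simp [cntI]

lemma cntI_le_length (s : List Int) (m : Int) : cntI s m ≤ (s.length : Int) := by
  simpa [cntI] using List.length_filter_le _ s

lemma cntI_cons (b : Int) (t : List Int) (m : Int) :
    cntI (b :: t) m = if b ≤ m then cntI t m + 1 else cntI t m := by
  by_cases h : b ≤ m <;> simp [cntI, h]

-- if every element exceeds m, the count is 0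
lemma cntI_eq_zero (s : List Int) (m : Int) (h : ∀ b ∈ s, m < b) : cntI s m = 0 := by
  have : s.filter (fun b => b ≤ m) = [] := by
    apply List.filter_eq_nil_iff.mpr
    intro b hb
    simpa using not_le.mpr (h b hb)
  simp [cntI, this]

-- the split characterisation of the count
lemma cntI_eq_of_split (s : List Int) (x : Int) (r : Nat) (hr : r ≤ s.length)
    (hlo : ∀ (j : Nat) (hj : j < s.length), j < r → s[j] ≤ x)
    (hhi : ∀ (j : Nat) (hj : j < s.length), r ≤ j → x < s[j]) :
    cntI s x = (r : Int) := by
  have hsplit : s = s.take r ++ s.drop r := (List.take_append_drop r s).symm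
  have h1 : (s.take r).filter (fun b => b ≤ x) = s.take r := by
    apply List.filter_eq_self.mpr
    intro b hb
    obtain ⟨j, hj, rfl⟩ := List.mem_iff_getElem.mp hb
    have hjr : j < r := by simp at hj; omega
    have hjs : j < s.length := by simp at hj; omega
    rw [List.getElem_take]
    simpa using hlo j hjs hjr
  have h2 : (s.drop r).filter (fun b => b ≤ x) = [] := by
    apply List.filter_eq_nil_iff.mpr
    intro b hb
    obtain ⟨j, hj, rfl⟩ := List.mem_iff_getElem.mp hb
    have hjs : r + j < s.length := by simp at hj; omega
    rw [List.getElem_drop]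
    simpa using not_le.mpr (hhi (r + j) hjs (by omega))
  unfold cntI
  conv_lhs => rw [hsplit]
  rw [List.filter_append, h1, h2]
  have : r ≤ s.length := hr
  simp [List.length_take]
  omega

-- correctness of the hand-written binary search
lemma bisectAux_eq_aux (s : List Int) (x : Int) (hs : s.Pairwise (· ≤ ·)) :
    ∀ (k : Nat) (lo hi : Int), (hi - lo).toNat ≤ k → 0 ≤ lo → lo ≤ hi → hi ≤ (s.length : Int) →
      (∀ (j : Nat) (hj : j < s.length), (j : Int) < lo → s[j] ≤ x) →
      (∀ (j : Nat) (hj : j < s.length), hi ≤ (j : Int) → x < s[j]) →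
      bisectAux s x lo hi = cntI s x := by
  have hfin : ∀ lo : Int, 0 ≤ lo → lo ≤ (s.length : Int) →
      (∀ (j : Nat) (hj : j < s.length), (j : Int) < lo → s[j] ≤ x) →
      (∀ (j : Nat) (hj : j < s.length), lo ≤ (j : Int) → x < s[j]) →
      lo = cntI s x := by
    intro lo h0 hle Hlo Hhi
    have h := cntI_eq_of_split s x lo.toNat (by omega)
      (fun j hj hjr => Hlo j hj (by omega)) (fun j hj hjr => Hhi j hj (by omega))
    omega
  intro k
  induction k with
  | zero =>
    intro lo hi hk h0 hlh hhl Hlo Hhi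
    rw [bisectAux, dif_neg (by omega : ¬ lo < hi)]
    exact hfin lo h0 (by omega) Hlo (fun j hj hge => Hhi j hj (by omega))
  | succ k ih =>
    intro lo hi hk h0 hlh hhl Hlo Hhi
    by_cases h : lo < hi
    · rw [bisectAux]
      simp only [dif_pos h]
      rw [PySem.Int.floordiv_eq_ediv_of_pos (show (0:Int) < 2 by omega)]
      have hb1 : lo ≤ (lo + hi) / 2 := by omega
      have hb2 : (lo + hi) / 2 < hi := by omega
      rw [PySem.List.pyGetD_eq_getElem s 0 (by omega) (by omega)]
      have hpw := List.pairwise_iff_getElem.mp hs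
      split
      · next hcmp =>
        apply ih ((lo + hi) / 2 + 1) hi (by omega) (by omega) (by omega) hhl ?_ Hhi
        intro j hj hjlt
        have hjm : j ≤ ((lo + hi) / 2).toNat := by omega
        rcases eq_or_lt_of_le hjm with heq | hlt
        · subst heq; exact hcmp
        · exact le_trans (hpw j _ hj (by omega) hlt) hcmp
      · next hcmp =>
        apply ih lo ((lo + hi) / 2) (by omega) h0 (by omega) (by omega) Hlo ?_
        intro j hj hge
        have hx : x < s[((lo + hi) / 2).toNat]'(by omega) := not_le.mp hcmp
        rcases eq_or_lt_of_le (show ((lo + hi) / 2).toNat ≤ j by omega) with heq | hlt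
        · exact heq ▸ hx
        · exact lt_of_lt_of_le hx (hpw _ j (by omega) hj hlt)
    · rw [bisectAux, dif_neg h]
      exact hfin lo h0 (by omega) Hlo (fun j hj hge => Hhi j hj (by omega))

lemma bisectRightB_eq (s : List Int) (x : Int) (hs : s.Pairwise (· ≤ ·)) :
    bisectRightB s x = cntI s x := by
  apply bisectAux_eq_aux s x hs (s.length : Int).toNat 0 (s.length : Int)
    (by omega) (by omega) (by omega) (by omega)
  · intro j hj h; omega
  · intro j hj h; omega

-- A's shift loop
def loopA (s : List Int) (n : Int) : Int := s.foldl (fun m b => if b ≤ m then m + 1 else m) n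

lemma loopA_ge (s : List Int) (n : Int) : n ≤ loopA s n := by
  induction s generalizing n with
  | nil => simp [loopA]
  | cons b t ih =>
    have := ih (if b ≤ n then n + 1 else n)
    simp only [loopA, List.foldl_cons] at *
    split_ifs at * <;> omega

lemma loopA_all_gt (s : List Int) (n : Int) (h : ∀ b ∈ s, n < b) : loopA s n = n := by
  induction s with
  | nil => simp [loopA]
  | cons b t ih =>
    have hb : ¬ b ≤ n := not_le.mpr (h b (by simp))
    simp only [loopA, List.foldl_cons, if_neg hb]
    exact ih fun b hb => h b (by simp [hb])

-- the fixpoint / minimality characterisation of A's loop on a sorted list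
lemma loopA_char : ∀ (s : List Int), s.Pairwise (· ≤ ·) →
    ∀ n : Int, loopA s n = n + cntI s (loopA s n) ∧
      (∀ m : Int, n ≤ m → m < loopA s n → m - cntI s m < n) := by
  intro s
  induction s with
  | nil =>
    intro _ n
    refine ⟨by simp [loopA, cntI], ?_⟩
    intro m h1 h2
    simp [loopA] at h2
    omega
  | cons b t ih =>
    intro hs n
    have hs' : t.Pairwise (· ≤ ·) := hs.of_cons
    have hbt : ∀ y ∈ t, b ≤ y := (List.pairwise_cons.mp hs).1
    by_cases hb : b ≤ n
    · have hstep : loopA (b :: t) n = loopA t (n + 1) := by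
        simp [loopA, if_pos hb]
      obtain ⟨ih1, ih2⟩ := ih hs' (n + 1)
      have hge : n + 1 ≤ loopA t (n + 1) := loopA_ge t (n + 1)
      constructor
      · rw [hstep, cntI_cons, if_pos (by omega : b ≤ loopA t (n + 1))]
        omega
      · intro m h1 h2
        rw [hstep] at h2
        rw [cntI_cons, if_pos (by omega : b ≤ m)]
        by_cases hm : n + 1 ≤ m
        · have := ih2 m hm h2; omega
        · have := cntI_nonneg t m; omega
    · have hall : ∀ y ∈ b :: t, n < y := by
        intro y hy
        rcases List.mem_cons.mp hy with rfl | hy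
        · omega
        · exact lt_of_lt_of_le (by omega) (hbt y hy)
      have hloop : loopA (b :: t) n = n := loopA_all_gt _ n hall
      constructor
      · rw [hloop, cntI_eq_zero _ n hall]; omega
      · intro m h1 h2
        rw [hloop] at h2
        omega

-- the candidate scan reaches A's loop result
lemma scanAux_reach (s : List Int) (hs : s.Pairwise (· ≤ ·)) (n R : Int)
    (hfix : n ≤ R - cntI s R)
    (hmin : ∀ m : Int, n ≤ m → m < R → m - cntI s m < n) :
    ∀ (fuel : Nat) (m : Int), n ≤ m → m ≤ R → (R - m).toNat ≤ fuel →
      scanAux s n m fuel = R := by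
  intro fuel
  induction fuel with
  | zero => intro m _ h2 h3; simp only [scanAux]; omega
  | succ k ih =>
    intro m h1 h2 h3
    simp only [scanAux, bisectRightB_eq s m hs]
    by_cases hc : m - cntI s m < n
    · rw [if_pos hc]
      have hne : m ≠ R := by intro h; rw [h] at hc; omega
      exact ih (m + 1) (by omega) (by omega) (by omega)
    · rw [if_neg hc]
      by_cases hmR : m < R
      · exact absurd (hmin m h1 hmR) hc
      · omega

-- the two helper styles agree
lemma wordNum_eq (w : String) : wordNum w = originNum w := by
  unfold wordNum originNum
  congr 1
  funext num c
  ring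

lemma numWordAux_eq (k : Nat) : ∀ num : Int, num.toNat ≤ k →
    ∀ out : List Char, numWordAux num out = (wordChars num).reverse ++ out := by
  induction k with
  | zero =>
    intro num hk out
    rw [numWordAux, dif_neg (by omega : ¬ 0 < num), wordChars, dif_neg (by omega : ¬ 0 < num)]
    simp
  | succ k ih =>
    intro num hk out
    by_cases h : 0 < num
    · rw [numWordAux, dif_pos h, wordChars, dif_pos h]
      have hdec : (PySem.Int.floordiv (num - 1) 26).toNat ≤ k := by
        rw [PySem.Int.floordiv_eq_ediv_of_pos (by omega : (0:Int) < 26)]; omega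
      rw [ih _ hdec]
      simp
    · rw [numWordAux, dif_neg h, wordChars, dif_neg h]
      simp

lemma numWord_eq (num : Int) : numWord num = wordFromNum num := by
  unfold numWord wordFromNum
  rw [numWordAux_eq num.toNat num le_rfl []]
  simp

lemma solution_eq (n : Int) (bans : List String) : solution n bans = solution_alt n bans := by
  simp only [solution, solution_alt]
  have hmaps : bans.map (fun w => wordNum w) = bans.map (fun w => originNum w) :=
    List.map_congr_left (fun w _ => wordNum_eq w)
  rw [hmaps, numWord_eq]
  congr 1
  set s := PySem.List.sorted (bans.map fun w => originNum w) (fun x => x) false with hsdef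
  have hs : s.Pairwise (· ≤ ·) := PySem.List.sorted_pairwise _ _
  obtain ⟨hfix, hmin⟩ := loopA_char s hs n
  have hge := loopA_ge s n
  have hcle := cntI_le_length s (loopA s n)
  have hcnn := cntI_nonneg s (loopA s n)
  exact (scanAux_reach s hs n (loopA s n) (by omega) hmin (s.length + 1) n (by omega)
    (by omega) (by omega)).symm

-- ===== VERDICT (by name: the statement is the Claim_ definition above) =====
theorem solution_spec : Claim_equal_solution := by
  intro n bans _
  unfold Spec_solution
  exact solution_eq n bans
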